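-- pv_equiv track=rewrite | github.com/merldsu/PY_UVM_Framework | framework/generator_exclude_instruction.py | rv32imf_exclude
-- ===== SOURCE A (Python) =====
-- def rv32imf_exclude(instruct_generated,exclude_instructions): # This function exclude the instruction from riscv instruction set architecture (rv32imf).
-- 	status=0
-- 	for y in exclude_instructions: # Considering the user's request to exclude the specific instruction, this involves excluding the particular instruction provided by the user in the configuration file.
--
-- 		if (y=="auipc" and instruct_generated[27:34]=="0010111"):
-- 			status=1
-- 		if (y=="lb" and instruct_generated[19:22]=="000" and instruct_generated[27:34]=="0000011"):
-- 			status=1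
-- 		if (y=="lh" and instruct_generated[19:22]=="001" and instruct_generated[27:34]=="0000011"):
-- 			status=1
-- 		if (y=="lw" and instruct_generated[19:22]=="010" and instruct_generated[27:34]=="0000011"):
-- 			status=1
-- 		if (y=="lbu" and instruct_generated[19:22]=="100" and instruct_generated[27:34]=="0000011"):
-- 			status=1
-- 		if (y=="lhu" and instruct_generated[19:22]=="101" and instruct_generated[27:34]=="0000011"):
-- 			status=1
-- 		if (y=="sb" and instruct_generated[19:22]=="000" and instruct_generated[27:34]=="0100011"):
-- 			status=1
-- 		if (y=="sh" and instruct_generated[19:22]=="001" and instruct_generated[27:34]=="0100011"):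
-- 			status=1
-- 		if (y=="sw" and instruct_generated[19:22]=="010" and instruct_generated[27:34]=="0100011"):
-- 			status=1
-- 		if (y=="slti" and instruct_generated[19:22]=="010" and instruct_generated[27:34]=="0010011"):
-- 			status=1
-- 		if (y=="sltiu" and instruct_generated[19:22]=="011" and instruct_generated[27:34]=="0010011"):
-- 			status=1
-- 		if (y=="xori" and instruct_generated[19:22]=="100" and instruct_generated[27:34]=="0010011"):
-- 			status=1
-- 		if (y=="ori" and instruct_generated[19:22]=="110" and instruct_generated[27:34]=="0010011"):
-- 			status=1
-- 		if (y=="andi" and instruct_generated[19:22]=="111" and instruct_generated[27:34]=="0010011"):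
-- 			status=1
-- 		if (y=="slli" and instruct_generated[19:22]=="001" and instruct_generated[27:34]=="0010011"):
-- 			status=1
-- 		if (y=="srli" and instruct_generated[19:22]=="101" and instruct_generated[27:34]=="0010011" and instruct_generated[2:9]=="0000000"):
-- 			status=1
-- 		if (y=="srai" and instruct_generated[19:22]=="101" and instruct_generated[27:34]=="0010011" and instruct_generated[2:9]=="0100000"):
-- 			status=1
-- 		if (y=="add" and instruct_generated[19:22]=="000" and instruct_generated[27:34]=="0110011" and instruct_generated[2:9]=="0000000"):
-- 			status=1
-- 		if (y=="sub" and instruct_generated[19:22]=="000" and instruct_generated[27:34]=="0110011" and instruct_generated[2:9]=="0100000"):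
-- 			status=1
-- 		if (y=="sll" and instruct_generated[19:22]=="001" and instruct_generated[27:34]=="0110011"):
-- 			status=1
-- 		if (y=="slt" and instruct_generated[19:22]=="010" and instruct_generated[27:34]=="0110011"):
-- 			status=1
-- 		if (y=="sltu" and instruct_generated[19:22]=="011" and instruct_generated[27:34]=="0110011"):
-- 			status=1
-- 		if (y=="xor" and instruct_generated[19:22]=="100" and instruct_generated[27:34]=="0110011"):
-- 			status=1
-- 		if (y=="srl" and instruct_generated[19:22]=="101" and instruct_generated[27:34]=="0110011" and instruct_generated[2:9]=="0000000"):
-- 			status=1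
-- 		if (y=="sra" and instruct_generated[19:22]=="101" and instruct_generated[27:34]=="0110011" and instruct_generated[2:9]=="0100000"):
-- 			status=1
-- 		if (y=="or" and instruct_generated[19:22]=="110" and instruct_generated[27:34]=="0110011"):
-- 			status=1
-- 		if (y=="and" and instruct_generated[19:22]=="111" and instruct_generated[27:34]=="0110011"):
-- 			status=1
-- 		if (y=="mul" and instruct_generated[19:22]=="000" and instruct_generated[27:34]=="0110011" and instruct_generated[2:9]=="0000001"):
-- 			status = 1
-- 		if (y=="mulh" and instruct_generated[19:22]=="001" and instruct_generated[27:34]=="0110011" and instruct_generated[2:9]=="0000001"):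
-- 			status = 1
-- 		if (y=="mulhsu" and instruct_generated[19:22]=="010" and instruct_generated[27:34]=="0110011" and instruct_generated[2:9]=="0000001"):
-- 			status = 1
-- 		if (y=="mulhu" and instruct_generated[19:22]=="011" and instruct_generated[27:34]=="0110011" and instruct_generated[2:9]=="0000001"):
-- 			status = 1
-- 		if (y=="div" and instruct_generated[19:22]=="100" and instruct_generated[27:34]=="0110011" and instruct_generated[2:9]=="0000001"):
-- 			status = 1
-- 		if (y=="divu" and instruct_generated[19:22]=="101" and instruct_generated[27:34]=="0110011" and instruct_generated[2:9]=="0000001"):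
-- 			status = 1
-- 		if (y=="rem" and instruct_generated[19:22]=="110" and instruct_generated[27:34]=="0110011" and instruct_generated[2:9]=="0000001"):
-- 			status = 1
-- 		if (y=="remu" and instruct_generated[19:22]=="111" and instruct_generated[27:34]=="0110011" and instruct_generated[2:9]=="0000001"):
-- 			status = 1
--
-- 	return status
-- ===== SOURCE B (Python) =====
-- # Decode once against an instruction table (keeping ALL matching mnemonics, since
-- # base R-type ops overlap with M-extension encodings), then test the exclude list
-- # against that matched set -- instead of A's 35 pattern checks per excluded name.
-- _TABLE = [
--     ("auipc", None, "0010111", None),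
--     ("lb", "000", "0000011", None),
--     ("lh", "001", "0000011", None),
--     ("lw", "010", "0000011", None),
--     ("lbu", "100", "0000011", None),
--     ("lhu", "101", "0000011", None),
--     ("sb", "000", "0100011", None),
--     ("sh", "001", "0100011", None),
--     ("sw", "010", "0100011", None),
--     ("slti", "010", "0010011", None),
--     ("sltiu", "011", "0010011", None),
--     ("xori", "100", "0010011", None),
--     ("ori", "110", "0010011", None),
--     ("andi", "111", "0010011", None),
--     ("slli", "001", "0010011", None),
--     ("srli", "101", "0010011", "0000000"),
--     ("srai", "101", "0010011", "0100000"),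
--     ("add", "000", "0110011", "0000000"),
--     ("sub", "000", "0110011", "0100000"),
--     ("sll", "001", "0110011", None),
--     ("slt", "010", "0110011", None),
--     ("sltu", "011", "0110011", None),
--     ("xor", "100", "0110011", None),
--     ("srl", "101", "0110011", "0000000"),
--     ("sra", "101", "0110011", "0100000"),
--     ("or", "110", "0110011", None),
--     ("and", "111", "0110011", None),
--     ("mul", "000", "0110011", "0000001"),
--     ("mulh", "001", "0110011", "0000001"),
--     ("mulhsu", "010", "0110011", "0000001"),
--     ("mulhu", "011", "0110011", "0000001"),
--     ("div", "100", "0110011", "0000001"),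
--     ("divu", "101", "0110011", "0000001"),
--     ("rem", "110", "0110011", "0000001"),
--     ("remu", "111", "0110011", "0000001"),
-- ]
--
-- def rv32imf_exclude(instruct_generated, exclude_instructions):
--     f3 = instruct_generated[19:22]
--     op = instruct_generated[27:34]
--     f7 = instruct_generated[2:9]
--     matched = {name for (name, nf3, nop, nf7) in _TABLE
--                if (nf3 is None or f3 == nf3)
--                and op == nop
--                and (nf7 is None or f7 == nf7)}
--     return 1 if matched.intersection(exclude_instructions) else 0
-- ===== Notes on version B (the rewrite author's own statement) =====
-- stated objective: faster
-- what changed: B decodes the instruction word once against a 35-entry encoding table, collecting the set of ALL matching mnemonics (base R-type ops overlap M-extension encodings), and returns 1 iff that set intersects the exclude list, replacing A's 35 hard-coded pattern checks per excluded name. (constant-factor: per exclude item one set-membership test instead of 35 string-pattern comparisons)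
import Mathlib
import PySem

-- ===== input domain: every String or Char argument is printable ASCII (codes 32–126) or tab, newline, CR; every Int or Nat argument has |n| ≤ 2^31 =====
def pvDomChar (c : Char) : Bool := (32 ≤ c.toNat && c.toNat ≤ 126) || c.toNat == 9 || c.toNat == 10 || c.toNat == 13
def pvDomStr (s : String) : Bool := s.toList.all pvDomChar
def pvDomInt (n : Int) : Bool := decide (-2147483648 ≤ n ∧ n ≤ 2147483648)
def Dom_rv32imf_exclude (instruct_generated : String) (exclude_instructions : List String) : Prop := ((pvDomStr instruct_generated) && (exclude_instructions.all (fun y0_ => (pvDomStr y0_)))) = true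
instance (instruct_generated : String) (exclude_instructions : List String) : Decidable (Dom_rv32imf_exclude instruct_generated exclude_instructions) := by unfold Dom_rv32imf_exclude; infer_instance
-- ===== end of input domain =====

-- B decodes the word once against an instruction table (keeping all matching mnemonics,
-- since base R-type ops overlap the M-extension encodings) and intersects with the
-- exclude list: one table pass instead of 35 pattern checks per excluded name.


-- ===== PORT A =====
-- Literal transliteration of A: fold over exclude_instructions; each iteration runs
-- the same 35 independent ifs on the same string slices, in A's order.
def rv32imf_step (instruct_generated : String) (y : String) (status : Int) : Int :=
  let s0 : Int := if y == "auipc" && PySem.Str.slice instruct_generated (some 27) (some 34) == "0010111" then 1 else status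
  let s1 : Int := if y == "lb" && PySem.Str.slice instruct_generated (some 19) (some 22) == "000" && PySem.Str.slice instruct_generated (some 27) (some 34) == "0000011" then 1 else s0
  let s2 : Int := if y == "lh" && PySem.Str.slice instruct_generated (some 19) (some 22) == "001" && PySem.Str.slice instruct_generated (some 27) (some 34) == "0000011" then 1 else s1
  let s3 : Int := if y == "lw" && PySem.Str.slice instruct_generated (some 19) (some 22) == "010" && PySem.Str.slice instruct_generated (some 27) (some 34) == "0000011" then 1 else s2
  let s4 : Int := if y == "lbu" && PySem.Str.slice instruct_generated (some 19) (some 22) == "100" && PySem.Str.slice instruct_generated (some 27) (some 34) == "0000011" then 1 else s3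
  let s5 : Int := if y == "lhu" && PySem.Str.slice instruct_generated (some 19) (some 22) == "101" && PySem.Str.slice instruct_generated (some 27) (some 34) == "0000011" then 1 else s4
  let s6 : Int := if y == "sb" && PySem.Str.slice instruct_generated (some 19) (some 22) == "000" && PySem.Str.slice instruct_generated (some 27) (some 34) == "0100011" then 1 else s5
  let s7 : Int := if y == "sh" && PySem.Str.slice instruct_generated (some 19) (some 22) == "001" && PySem.Str.slice instruct_generated (some 27) (some 34) == "0100011" then 1 else s6
  let s8 : Int := if y == "sw" && PySem.Str.slice instruct_generated (some 19) (some 22) == "010" && PySem.Str.slice instruct_generated (some 27) (some 34) == "0100011" then 1 else s7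
  let s9 : Int := if y == "slti" && PySem.Str.slice instruct_generated (some 19) (some 22) == "010" && PySem.Str.slice instruct_generated (some 27) (some 34) == "0010011" then 1 else s8
  let s10 : Int := if y == "sltiu" && PySem.Str.slice instruct_generated (some 19) (some 22) == "011" && PySem.Str.slice instruct_generated (some 27) (some 34) == "0010011" then 1 else s9
  let s11 : Int := if y == "xori" && PySem.Str.slice instruct_generated (some 19) (some 22) == "100" && PySem.Str.slice instruct_generated (some 27) (some 34) == "0010011" then 1 else s10
  let s12 : Int := if y == "ori" && PySem.Str.slice instruct_generated (some 19) (some 22) == "110" && PySem.Str.slice instruct_generated (some 27) (some 34) == "0010011" then 1 else s11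
  let s13 : Int := if y == "andi" && PySem.Str.slice instruct_generated (some 19) (some 22) == "111" && PySem.Str.slice instruct_generated (some 27) (some 34) == "0010011" then 1 else s12
  let s14 : Int := if y == "slli" && PySem.Str.slice instruct_generated (some 19) (some 22) == "001" && PySem.Str.slice instruct_generated (some 27) (some 34) == "0010011" then 1 else s13
  let s15 : Int := if y == "srli" && PySem.Str.slice instruct_generated (some 19) (some 22) == "101" && PySem.Str.slice instruct_generated (some 27) (some 34) == "0010011" && PySem.Str.slice instruct_generated (some 2) (some 9) == "0000000" then 1 else s14
  let s16 : Int := if y == "srai" && PySem.Str.slice instruct_generated (some 19) (some 22) == "101" && PySem.Str.slice instruct_generated (some 27) (some 34) == "0010011" && PySem.Str.slice instruct_generated (some 2) (some 9) == "0100000" then 1 else s15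
  let s17 : Int := if y == "add" && PySem.Str.slice instruct_generated (some 19) (some 22) == "000" && PySem.Str.slice instruct_generated (some 27) (some 34) == "0110011" && PySem.Str.slice instruct_generated (some 2) (some 9) == "0000000" then 1 else s16
  let s18 : Int := if y == "sub" && PySem.Str.slice instruct_generated (some 19) (some 22) == "000" && PySem.Str.slice instruct_generated (some 27) (some 34) == "0110011" && PySem.Str.slice instruct_generated (some 2) (some 9) == "0100000" then 1 else s17
  let s19 : Int := if y == "sll" && PySem.Str.slice instruct_generated (some 19) (some 22) == "001" && PySem.Str.slice instruct_generated (some 27) (some 34) == "0110011" then 1 else s18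
  let s20 : Int := if y == "slt" && PySem.Str.slice instruct_generated (some 19) (some 22) == "010" && PySem.Str.slice instruct_generated (some 27) (some 34) == "0110011" then 1 else s19
  let s21 : Int := if y == "sltu" && PySem.Str.slice instruct_generated (some 19) (some 22) == "011" && PySem.Str.slice instruct_generated (some 27) (some 34) == "0110011" then 1 else s20
  let s22 : Int := if y == "xor" && PySem.Str.slice instruct_generated (some 19) (some 22) == "100" && PySem.Str.slice instruct_generated (some 27) (some 34) == "0110011" then 1 else s21
  let s23 : Int := if y == "srl" && PySem.Str.slice instruct_generated (some 19) (some 22) == "101" && PySem.Str.slice instruct_generated (some 27) (some 34) == "0110011" && PySem.Str.slice instruct_generated (some 2) (some 9) == "0000000" then 1 else s22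
  let s24 : Int := if y == "sra" && PySem.Str.slice instruct_generated (some 19) (some 22) == "101" && PySem.Str.slice instruct_generated (some 27) (some 34) == "0110011" && PySem.Str.slice instruct_generated (some 2) (some 9) == "0100000" then 1 else s23
  let s25 : Int := if y == "or" && PySem.Str.slice instruct_generated (some 19) (some 22) == "110" && PySem.Str.slice instruct_generated (some 27) (some 34) == "0110011" then 1 else s24
  let s26 : Int := if y == "and" && PySem.Str.slice instruct_generated (some 19) (some 22) == "111" && PySem.Str.slice instruct_generated (some 27) (some 34) == "0110011" then 1 else s25
  let s27 : Int := if y == "mul" && PySem.Str.slice instruct_generated (some 19) (some 22) == "000" && PySem.Str.slice instruct_generated (some 27) (some 34) == "0110011" && PySem.Str.slice instruct_generated (some 2) (some 9) == "0000001" then 1 else s26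
  let s28 : Int := if y == "mulh" && PySem.Str.slice instruct_generated (some 19) (some 22) == "001" && PySem.Str.slice instruct_generated (some 27) (some 34) == "0110011" && PySem.Str.slice instruct_generated (some 2) (some 9) == "0000001" then 1 else s27
  let s29 : Int := if y == "mulhsu" && PySem.Str.slice instruct_generated (some 19) (some 22) == "010" && PySem.Str.slice instruct_generated (some 27) (some 34) == "0110011" && PySem.Str.slice instruct_generated (some 2) (some 9) == "0000001" then 1 else s28
  let s30 : Int := if y == "mulhu" && PySem.Str.slice instruct_generated (some 19) (some 22) == "011" && PySem.Str.slice instruct_generated (some 27) (some 34) == "0110011" && PySem.Str.slice instruct_generated (some 2) (some 9) == "0000001" then 1 else s29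
  let s31 : Int := if y == "div" && PySem.Str.slice instruct_generated (some 19) (some 22) == "100" && PySem.Str.slice instruct_generated (some 27) (some 34) == "0110011" && PySem.Str.slice instruct_generated (some 2) (some 9) == "0000001" then 1 else s30
  let s32 : Int := if y == "divu" && PySem.Str.slice instruct_generated (some 19) (some 22) == "101" && PySem.Str.slice instruct_generated (some 27) (some 34) == "0110011" && PySem.Str.slice instruct_generated (some 2) (some 9) == "0000001" then 1 else s31
  let s33 : Int := if y == "rem" && PySem.Str.slice instruct_generated (some 19) (some 22) == "110" && PySem.Str.slice instruct_generated (some 27) (some 34) == "0110011" && PySem.Str.slice instruct_generated (some 2) (some 9) == "0000001" then 1 else s32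
  let s34 : Int := if y == "remu" && PySem.Str.slice instruct_generated (some 19) (some 22) == "111" && PySem.Str.slice instruct_generated (some 27) (some 34) == "0110011" && PySem.Str.slice instruct_generated (some 2) (some 9) == "0000001" then 1 else s33
  s34

def rv32imf_exclude (instruct_generated : String) (exclude_instructions : List String) : Int :=
  exclude_instructions.foldl (fun status y => rv32imf_step instruct_generated y status) 0

-- ===== PORT B =====
-- Instruction table: (mnemonic, funct3?, opcode, funct7?); 'none' = field not tested.
def pvTable : List (String × Option String × String × Option String) := [
  ("auipc", none, "0010111", none),
  ("lb", some "000", "0000011", none),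
  ("lh", some "001", "0000011", none),
  ("lw", some "010", "0000011", none),
  ("lbu", some "100", "0000011", none),
  ("lhu", some "101", "0000011", none),
  ("sb", some "000", "0100011", none),
  ("sh", some "001", "0100011", none),
  ("sw", some "010", "0100011", none),
  ("slti", some "010", "0010011", none),
  ("sltiu", some "011", "0010011", none),
  ("xori", some "100", "0010011", none),
  ("ori", some "110", "0010011", none),
  ("andi", some "111", "0010011", none),
  ("slli", some "001", "0010011", none),
  ("srli", some "101", "0010011", some "0000000"),
  ("srai", some "101", "0010011", some "0100000"),
  ("add", some "000", "0110011", some "0000000"),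
  ("sub", some "000", "0110011", some "0100000"),
  ("sll", some "001", "0110011", none),
  ("slt", some "010", "0110011", none),
  ("sltu", some "011", "0110011", none),
  ("xor", some "100", "0110011", none),
  ("srl", some "101", "0110011", some "0000000"),
  ("sra", some "101", "0110011", some "0100000"),
  ("or", some "110", "0110011", none),
  ("and", some "111", "0110011", none),
  ("mul", some "000", "0110011", some "0000001"),
  ("mulh", some "001", "0110011", some "0000001"),
  ("mulhsu", some "010", "0110011", some "0000001"),
  ("mulhu", some "011", "0110011", some "0000001"),
  ("div", some "100", "0110011", some "0000001"),
  ("divu", some "101", "0110011", some "0000001"),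
  ("rem", some "110", "0110011", some "0000001"),
  ("remu", some "111", "0110011", some "0000001")]

-- Port of B: slice the three fields once, filter the table for ALL matching
-- mnemonics, then return 1 iff the exclude list meets the matched set.
def rv32imf_exclude_alt (instruct_generated : String) (exclude_instructions : List String) : Int :=
  let f3 := PySem.Str.slice instruct_generated (some 19) (some 22)
  let op := PySem.Str.slice instruct_generated (some 27) (some 34)
  let f7 := PySem.Str.slice instruct_generated (some 2) (some 9)
  let matched := (pvTable.filter (fun e =>
      (match e.2.1 with | none => true | some v => f3 == v) &&
      op == e.2.2.1 &&
      (match e.2.2.2 with | none => true | some v => f7 == v))).map (fun e => e.1)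
  if exclude_instructions.any (fun y => matched.contains y) then 1 else 0

-- ===== PRECONDITION & SPEC =====
def Spec_rv32imf_exclude (instruct_generated : String) (exclude_instructions : List String) (out : Int) : Prop := out = rv32imf_exclude_alt instruct_generated exclude_instructions
instance (instruct_generated : String) (exclude_instructions : List String) (out : Int) : Decidable (Spec_rv32imf_exclude instruct_generated exclude_instructions out) := by unfold Spec_rv32imf_exclude; infer_instance

-- ===== CLAIM (what is proved, stated in full; the proofs are below) =====
def Claim_equal_rv32imf_exclude : Prop := ∀ (instruct_generated : String) (exclude_instructions : List String), Dom_rv32imf_exclude instruct_generated exclude_instructions → Spec_rv32imf_exclude instruct_generated exclude_instructions (rv32imf_exclude instruct_generated exclude_instructions)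

-- ===== LEMMAS AND PROOFS =====

-- collapse two stacked "set status to 1" ifs into one test of the disjunction
theorem pvIfChain (c d : Bool) (s : Int) :
    (if d then (1:Int) else if c then 1 else s) = if c || d then 1 else s := by
  cases c <;> cases d <;> simp

-- membership in the filtered-and-projected table is an 'any' over the table
theorem pvContainsFilterMap {α : Type} (l : List (String × α)) (p : String × α → Bool) (y : String) :
    ((l.filter p).map (fun e => e.1)).contains y = l.any (fun e => (y == e.1) && p e) := by
  induction l with
  | nil => simp
  | cons e t ih =>
    simp only [List.contains_eq_mem] at ih
    by_cases h : p e = true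
    · rw [List.filter_cons_of_pos h]
      simp [h, ih]
    · rw [List.filter_cons_of_neg h]
      simp [h, ih]

-- B's matched-set membership, as a function of the word and the candidate name
def pvMatch (instruct_generated y : String) : Bool :=
  ((pvTable.filter (fun e =>
      (match e.2.1 with | none => true | some v => PySem.Str.slice instruct_generated (some 19) (some 22) == v) &&
      PySem.Str.slice instruct_generated (some 27) (some 34) == e.2.2.1 &&
      (match e.2.2.2 with | none => true | some v => PySem.Str.slice instruct_generated (some 2) (some 9) == v))).map (fun e => e.1)).contains y

-- A's 35-way if-cascade equals a single test of B's matched set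
theorem pvStepEq (instruct_generated y : String) (s : Int) :
    (rv32imf_step instruct_generated y s) = if pvMatch instruct_generated y then 1 else s := by
  unfold rv32imf_step pvMatch
  rw [pvContainsFilterMap]
  simp only [pvTable, List.any_cons, List.any_nil, pvIfChain]
  simp only [Bool.true_and, Bool.and_true, Bool.or_false, Bool.and_assoc, Bool.or_assoc]

theorem pvFoldAux (instruct_generated : String) (excl : List String) (s : Int) :
    excl.foldl (fun status y => rv32imf_step instruct_generated y status) s =
      if excl.any (fun y => pvMatch instruct_generated y) then 1 else s := by
  induction excl generalizing s with
  | nil => simp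
  | cons y t ih =>
    rw [List.foldl_cons, ih, pvStepEq]
    cases h : pvMatch instruct_generated y <;> simp [h]

theorem rv32imf_exclude_eq (instruct_generated : String) (excl : List String) :
    rv32imf_exclude instruct_generated excl = rv32imf_exclude_alt instruct_generated excl := by
  show _ = if excl.any (fun y => pvMatch instruct_generated y) then 1 else 0
  unfold rv32imf_exclude
  rw [pvFoldAux]


-- ===== VERDICT (by name: the statement is the Claim_ definition above) =====
theorem rv32imf_exclude_spec : Claim_equal_rv32imf_exclude := by
  intro ig excl _
  exact rv32imf_exclude_eq ig excl
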